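-- pv_equiv track=rewrite | github.com/soorajiam/graph-rail_line | final/algorithms.py | get_chain_d
-- ===== SOURCE A (Python) =====
-- def get_chain_d(argDict):
--     def each_path(i, caller_chain):
--         a = []
--         caller_chain.append(i)
--         b = argDict.get(i, [])
--         for j in b:
--             if j not in caller_chain:
--                 a.append(j)
--                 a.extend(each_path(j, caller_chain))
--         return a
--
--     return {i: each_path(i, []) for i in argDict}
-- ===== SOURCE B (Python) =====
-- def get_chain_d(argDict):
--     # Iterative DFS with an explicit stack of neighbor iterators; nodes are
--     # marked at discovery, and the visited order (minus the root) IS the answer.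
--     out = {}
--     for i in argDict:
--         visited = [i]
--         seen = {i}
--         stack = [iter(argDict.get(i, []))]
--         while stack:
--             for j in stack[-1]:
--                 if j not in seen:
--                     seen.add(j)
--                     visited.append(j)
--                     stack.append(iter(argDict.get(j, [])))
--                     break
--             else:
--                 stack.pop()
--         out[i] = visited[1:]
--     return out
-- ===== Notes on version B (the rewrite author's own statement) =====
-- stated objective: alternative
-- what changed: The recursive per-node DFS (nested each_path recursion threading a mutated chain) is replaced by an iterative DFS with an explicit stack of neighbor iterators that marks nodes at discovery; the per-root answer is read off as the discovery order minus the root instead of being assembled from nested sublists.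
import Mathlib
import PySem

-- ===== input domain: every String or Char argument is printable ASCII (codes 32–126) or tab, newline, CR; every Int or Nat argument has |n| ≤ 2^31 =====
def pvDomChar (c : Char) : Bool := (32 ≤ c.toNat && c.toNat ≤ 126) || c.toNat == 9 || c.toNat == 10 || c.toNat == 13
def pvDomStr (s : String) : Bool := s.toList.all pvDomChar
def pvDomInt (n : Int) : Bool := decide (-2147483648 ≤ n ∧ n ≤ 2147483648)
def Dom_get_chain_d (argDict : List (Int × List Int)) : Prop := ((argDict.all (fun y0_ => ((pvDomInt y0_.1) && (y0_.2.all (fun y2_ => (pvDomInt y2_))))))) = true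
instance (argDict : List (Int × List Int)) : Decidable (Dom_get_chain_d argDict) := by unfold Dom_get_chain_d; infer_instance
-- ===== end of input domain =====

-- B replaces the recursive per-root DFS (each_path threading a mutated chain) by an
-- iterative DFS with an explicit stack of pending neighbor lists marking at discovery,
-- and reads each root's answer off the discovery order minus the root (alternative
-- decomposition; same return values).

-- argDict.get(i, []) (shared helper: both Pythons perform exactly this dict lookup)
def pvGetAdj (d : List (Int × List Int)) (i : Int) : List Int :=
  PySem.Dict.getD (PySem.Dict.mk d) i []

-- ===== PORT A =====
-- each_path(i, caller_chain): returns (a, caller_chain) after the call; the fuel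
-- argument only makes the recursion structural and is never exhausted (pvEP_GO below).
def pvEachPathA (d : List (Int × List Int)) : Nat → Int → List Int → List Int × List Int
  | 0, _, chain => ([], chain)
  | f+1, i, chain =>
      (pvGetAdj d i).foldl
        (fun st j =>
          if j ∈ st.2 then st
          else
            let r := pvEachPathA d f j st.2
            (st.1 ++ j :: r.1, r.2))
        ([], chain ++ [i])

def get_chain_d (argDict : List (Int × List Int)) : List (Int × List Int) :=
  argDict.map (fun p =>
    (p.1, (pvEachPathA argDict ((argDict.map (·.2)).flatten.length + 1) p.1 []).1))

-- ===== PORT B =====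
-- fuel bound for Source B's while loop (a termination device only; never exhausted)
def pvNeedB (d : List (Int × List Int)) (stack : List (List Int)) (visited : List Int) : Nat :=
  (stack.map List.length).sum + stack.length +
    (((d.map (·.2)).flatten.dedup.filter (fun v => decide (v ∉ visited))).length)
      * ((d.map (·.2)).flatten.length + 1)

-- the while loop: stack of not-yet-consumed neighbor iterators, visited in discovery order
def pvLoopB (d : List (Int × List Int)) : Nat → List (List Int) → List Int → List Int
  | 0, _, visited => visited
  | _+1, [], visited => visited
  | f+1, [] :: S, visited => pvLoopB d f S visited
  | f+1, (j :: rest) :: S, visited =>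
      if j ∈ visited then pvLoopB d f (rest :: S) visited
      else pvLoopB d f (pvGetAdj d j :: rest :: S) (visited ++ [j])

def get_chain_d_alt (argDict : List (Int × List Int)) : List (Int × List Int) :=
  argDict.map (fun p =>
    (p.1,
      (pvLoopB argDict
        (pvNeedB argDict [pvGetAdj argDict p.1] [p.1] + 1)
        [pvGetAdj argDict p.1] [p.1]).tail))

-- ===== PRECONDITION & SPEC =====
def Spec_get_chain_d (argDict : List (Int × List Int)) (out : List (Int × List Int)) : Prop := out = get_chain_d_alt argDict
instance (argDict : List (Int × List Int)) (out : List (Int × List Int)) : Decidable (Spec_get_chain_d argDict out) := by unfold Spec_get_chain_d; infer_instance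

-- ===== CLAIM (what is proved, stated in full; the proofs are below) =====
def Claim_equal_get_chain_d : Prop := ∀ (argDict : List (Int × List Int)), Dom_get_chain_d argDict → Spec_get_chain_d argDict (get_chain_d argDict)

-- ===== LEMMAS AND PROOFS =====

-- the universe of nodes that can ever be appended beyond a root
def pvV (d : List (Int × List Int)) : List Int := (d.map (·.2)).flatten

-- measure: how many universe nodes are still outside the chain / visited list
def pvM (d : List (Int × List Int)) (c : List Int) : Nat :=
  ((pvV d).dedup.filter (fun v => decide (v ∉ c))).length

theorem pvM_antitone (d : List (Int × List Int)) (c e : List Int) :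
    pvM d (c ++ e) ≤ pvM d c := by
  unfold pvM
  exact (List.monotone_filter_right _ (by intro a ha; simp at ha ⊢; intro hc; exact ha.1 hc)).length_le

theorem pvM_strict (d : List (Int × List Int)) {c : List Int} {j : Int}
    (hj : j ∈ pvV d) (hnc : j ∉ c) : pvM d (c ++ [j]) < pvM d c := by
  unfold pvM
  have h1 : (pvV d).dedup.filter (fun v => decide (v ∉ c ++ [j]))
      = ((pvV d).dedup.filter (fun v => decide (v ∉ c))).filter (fun v => decide (v ≠ j)) := by
    rw [List.filter_filter]
    apply List.filter_congr
    intro x _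
    simp [List.mem_append]
    rw [Bool.and_comm]
  rw [h1]
  apply List.length_filter_lt_length_iff_exists.2
  exact ⟨j, by simp [List.mem_filter, List.mem_dedup, hj, hnc]⟩

theorem pvM_pos (d : List (Int × List Int)) {v : List Int} {j : Int}
    (hj : j ∈ pvV d) (hnv : j ∉ v) : 1 ≤ pvM d v := by
  have : j ∈ (pvV d).dedup.filter (fun x => decide (x ∉ v)) := by
    simp [List.mem_filter, List.mem_dedup, hj, hnv]
  have := List.length_pos_of_mem this
  unfold pvM; omega

theorem pvM_le (d : List (Int × List Int)) (c : List Int) : pvM d c ≤ (pvV d).length :=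
  le_trans (List.Sublist.length_le List.filter_sublist) (List.Sublist.length_le (List.dedup_sublist _))

theorem pvAdj_subset (d : List (Int × List Int)) (i : Int) :
    ∀ x ∈ pvGetAdj d i, x ∈ pvV d := by
  intro x hx
  unfold pvGetAdj PySem.Dict.getD PySem.Dict.get? at hx
  cases hfind : d.find? (fun p => p.1 == i) with
  | none => rw [hfind] at hx; simp at hx
  | some p =>
    rw [hfind] at hx; simp at hx
    have hp := List.mem_of_find?_eq_some hfind
    unfold pvV
    exact List.mem_flatten.2 ⟨p.2, List.mem_map.2 ⟨p, hp, rfl⟩, hx⟩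

theorem pvAdj_len (d : List (Int × List Int)) (i : Int) :
    (pvGetAdj d i).length ≤ (pvV d).length := by
  unfold pvGetAdj PySem.Dict.getD PySem.Dict.get?
  cases hfind : d.find? (fun p => p.1 == i) with
  | none => simp
  | some p =>
    simp only [Option.map_some, Option.getD_some]
    have hp := List.mem_of_find?_eq_some hfind
    unfold pvV
    rw [List.length_flatten]
    have : p.2.length ∈ ((d.map (·.2)).map List.length) :=
      List.mem_map.2 ⟨p.2, List.mem_map.2 ⟨p, hp, rfl⟩, rfl⟩
    exact List.le_sum_of_mem this

-- the fold inside each_path, as a function of the remaining neighbor list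
def pvGoA (d : List (Int × List Int)) (f : Nat) (ns : List Int)
    (st : List Int × List Int) : List Int × List Int :=
  ns.foldl
    (fun st j =>
      if j ∈ st.2 then st
      else
        let r := pvEachPathA d f j st.2
        (st.1 ++ j :: r.1, r.2))
    st

theorem pvGoA_cons (d : List (Int × List Int)) (f : Nat) (j : Int) (ns : List Int)
    (st : List Int × List Int) :
    pvGoA d f (j :: ns) st
      = pvGoA d f ns (if j ∈ st.2 then st
          else ((st.1 ++ j :: (pvEachPathA d f j st.2).1, (pvEachPathA d f j st.2).2))) := by
  by_cases h : j ∈ st.2 <;> simp [pvGoA, List.foldl_cons, h]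

-- the chain component does not depend on the accumulator component
theorem pvGoA_snd (d : List (Int × List Int)) (f : Nat) (ns : List Int)
    (x y c : List Int) : (pvGoA d f ns (x, c)).2 = (pvGoA d f ns (y, c)).2 := by
  induction ns generalizing x y c with
  | nil => rfl
  | cons j ns ih =>
    rw [pvGoA_cons, pvGoA_cons]
    by_cases h : j ∈ c <;> simp [h]
    · exact ih x y c
    · exact ih _ _ _

-- A never runs out of fuel, and appends the same segment to accumulator and chain
theorem pvEP_GO (d : List (Int × List Int)) (f : Nat) :
    (∀ i c, pvM d (c ++ [i]) < f →
      (pvEachPathA d f i c).2 = c ++ i :: (pvEachPathA d f i c).1) ∧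
    (∀ ns st, pvM d st.2 ≤ f → (∀ x ∈ ns, x ∈ pvV d) →
      ∃ t, pvGoA d f ns st = (st.1 ++ t, st.2 ++ t)) := by
  induction f using Nat.strong_induction_on with
  | _ f IH =>
    have hGO : ∀ ns st, pvM d st.2 ≤ f → (∀ x ∈ ns, x ∈ pvV d) →
        ∃ t, pvGoA d f ns st = (st.1 ++ t, st.2 ++ t) := by
      intro ns
      induction ns with
      | nil => intro st _ _; exact ⟨[], by simp [pvGoA]⟩
      | cons j ns ihns =>
        intro st hm hsub
        rw [pvGoA_cons]
        by_cases hj : j ∈ st.2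
        · simp only [hj, if_true]
          exact ihns st hm (fun x hx => hsub x (List.mem_cons_of_mem _ hx))
        · simp only [hj, if_false]
          have hjV : j ∈ pvV d := hsub j (List.mem_cons_self)
          have hstrict : pvM d (st.2 ++ [j]) < pvM d st.2 := pvM_strict d hjV hj
          obtain ⟨f', rfl⟩ : ∃ f', f = f' + 1 := ⟨f - 1, by omega⟩
          have hEP : (pvEachPathA d (f'+1) j st.2).2
              = st.2 ++ j :: (pvEachPathA d (f'+1) j st.2).1 := by
            have hGO' := (IH f' (by omega)).2
            show (pvGoA d f' (pvGetAdj d j) ([], st.2 ++ [j])).2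
                = st.2 ++ j :: (pvGoA d f' (pvGetAdj d j) ([], st.2 ++ [j])).1
            obtain ⟨t, ht⟩ := hGO' (pvGetAdj d j) ([], st.2 ++ [j])
              (by show pvM d (st.2 ++ [j]) ≤ f'; omega) (pvAdj_subset d j)
            rw [ht]; simp
          set r := pvEachPathA d (f'+1) j st.2 with hr
          obtain ⟨t, ht⟩ := ihns (st.1 ++ j :: r.1, r.2)
            (by rw [hEP]; calc pvM d (st.2 ++ j :: r.1) = pvM d (st.2 ++ [j] ++ r.1) := by simp
                _ ≤ pvM d (st.2 ++ [j]) := pvM_antitone _ _ _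
                _ ≤ f' + 1 := by omega)
            (fun x hx => hsub x (List.mem_cons_of_mem _ hx))
          refine ⟨j :: r.1 ++ t, ?_⟩
          rw [ht, hEP]
          simp
    refine ⟨?_, hGO⟩
    intro i c hm
    obtain ⟨f', rfl⟩ : ∃ f', f = f' + 1 := ⟨f - 1, by omega⟩
    show (pvGoA d f' (pvGetAdj d i) ([], c ++ [i])).2
        = c ++ i :: (pvGoA d f' (pvGetAdj d i) ([], c ++ [i])).1
    have hGO' := (IH f' (by omega)).2
    obtain ⟨t, ht⟩ := hGO' (pvGetAdj d i) ([], c ++ [i])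
      (by show pvM d (c ++ [i]) ≤ f'; omega) (pvAdj_subset d i)
    rw [ht]; simp

-- B side: the loop's fuel bound, stack invariant, stability above the bound
def pvSOK (d : List (Int × List Int)) (stack : List (List Int)) : Prop :=
  ∀ ns ∈ stack, ∀ j ∈ ns, j ∈ pvV d

theorem pvNeedB_eq (d : List (Int × List Int)) (stack : List (List Int)) (v : List Int) :
    pvNeedB d stack v
      = (stack.map List.length).sum + stack.length + pvM d v * ((pvV d).length + 1) := rfl

theorem pvNeedB_disc (d : List (Int × List Int)) {j : Int} (rest : List Int)
    (S : List (List Int)) {v : List Int} (hj : j ∈ pvV d) (hnv : j ∉ v) :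
    pvNeedB d (pvGetAdj d j :: rest :: S) (v ++ [j]) < pvNeedB d ((j :: rest) :: S) v := by
  rw [pvNeedB_eq, pvNeedB_eq]
  have h1 : pvM d (v ++ [j]) < pvM d v := pvM_strict d hj hnv
  have h2 : (pvGetAdj d j).length ≤ (pvV d).length := pvAdj_len d j
  have h3 : pvM d (v ++ [j]) * ((pvV d).length + 1)
      ≤ (pvM d v - 1) * ((pvV d).length + 1) :=
    Nat.mul_le_mul_right _ (by omega)
  have h4 : 1 ≤ pvM d v := pvM_pos d hj hnv
  have h5 : (pvM d v - 1) * ((pvV d).length + 1)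
      + ((pvV d).length + 1) = pvM d v * ((pvV d).length + 1) := by
    calc (pvM d v - 1) * ((pvV d).length + 1) + ((pvV d).length + 1)
        = (pvM d v - 1 + 1) * ((pvV d).length + 1) := by ring
      _ = pvM d v * ((pvV d).length + 1) := by rw [Nat.sub_add_cancel h4]
  simp only [List.map_cons, List.sum_cons, List.length_cons]
  omega

theorem pvB_mono (d : List (Int × List Int)) :
    ∀ f stack visited, pvSOK d stack → pvNeedB d stack visited < f →
      pvLoopB d f stack visited = pvLoopB d (f+1) stack visited := by
  intro f
  induction f using Nat.strong_induction_on with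
  | _ f IH =>
    intro stack visited hsok hlt
    obtain ⟨f', rfl⟩ : ∃ f', f = f' + 1 := ⟨f - 1, by omega⟩
    match stack with
    | [] => rfl
    | [] :: S =>
      show pvLoopB d f' S visited = pvLoopB d (f'+1) S visited
      refine IH f' (by omega) S visited (fun ns h => hsok ns (List.mem_cons_of_mem _ h)) ?_
      rw [pvNeedB_eq] at hlt ⊢
      simp only [List.map_cons, List.sum_cons, List.length_cons] at hlt
      omega
    | (j :: rest) :: S =>
      by_cases hj : j ∈ visited
      · show pvLoopB d (f'+1) _ _ = pvLoopB d (f'+1+1) _ _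
        rw [pvLoopB, pvLoopB]
        simp only [hj, if_true]
        refine IH f' (by omega) (rest :: S) visited
          (by intro ns h; rcases List.mem_cons.1 h with h1 | h2
              · subst h1; exact fun x hx => hsok (j::ns) List.mem_cons_self x (List.mem_cons_of_mem _ hx)
              · exact hsok ns (List.mem_cons_of_mem _ h2)) ?_
        rw [pvNeedB_eq] at hlt ⊢
        simp only [List.map_cons, List.sum_cons, List.length_cons] at hlt ⊢
        omega
      · show pvLoopB d (f'+1) _ _ = pvLoopB d (f'+1+1) _ _
        rw [pvLoopB, pvLoopB]
        simp only [hj, if_false]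
        have hjV : j ∈ pvV d := hsok (j :: rest) List.mem_cons_self j List.mem_cons_self
        refine IH f' (by omega) _ _ ?_ ?_
        · intro ns h
          rcases List.mem_cons.1 h with h1 | h2
          · subst h1; exact pvAdj_subset d j
          · rcases List.mem_cons.1 h2 with h3 | h4
            · subst h3; exact fun x hx => hsok (j::ns) List.mem_cons_self x (List.mem_cons_of_mem _ hx)
            · exact hsok ns (List.mem_cons_of_mem _ h4)
        · have := pvNeedB_disc d rest S hjV hj
          omega

theorem pvB_stable (d : List (Int × List Int)) :
    ∀ f stack visited, pvSOK d stack → pvNeedB d stack visited < f →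
      pvLoopB d f stack visited = pvLoopB d (pvNeedB d stack visited + 1) stack visited := by
  intro f stack visited hsok hlt
  obtain ⟨k, rfl⟩ : ∃ k, f = pvNeedB d stack visited + 1 + k := ⟨f - (pvNeedB d stack visited + 1), by omega⟩
  clear hlt
  induction k with
  | zero => rfl
  | succ k ih =>
    have hm := pvB_mono d (pvNeedB d stack visited + 1 + k) stack visited hsok (by omega)
    show pvLoopB d (pvNeedB d stack visited + 1 + k + 1) stack visited = _
    rw [← hm]
    exact ih

-- simulation: the iterator-stack loop computes exactly A's chain
theorem pvSIM (d : List (Int × List Int)) :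
    ∀ f ns v S, pvM d v ≤ f → (∀ x ∈ ns, x ∈ pvV d) → pvSOK d S →
      pvLoopB d (pvNeedB d (ns :: S) v + 1) (ns :: S) v
        = pvLoopB d (pvNeedB d S (pvGoA d f ns ([], v)).2 + 1) S (pvGoA d f ns ([], v)).2 := by
  intro f
  induction f using Nat.strong_induction_on with
  | _ f IHf =>
    intro ns
    induction ns with
    | nil =>
      intro v S hm hsub hsok
      show pvLoopB d (pvNeedB d ([] :: S) v + 1) ([] :: S) v = _
      have hstep : pvNeedB d ([] :: S) v = pvNeedB d S v + 1 := by
        rw [pvNeedB_eq, pvNeedB_eq]; simp only [List.map_cons, List.sum_cons, List.length_cons, List.length_nil]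
        omega
      rw [hstep]
      show pvLoopB d (pvNeedB d S v + 1) S v = _
      rfl
    | cons j rest ihns =>
      intro v S hm hsub hsok
      by_cases hj : j ∈ v
      · -- skip step
        have hstep : pvNeedB d ((j :: rest) :: S) v = pvNeedB d (rest :: S) v + 1 := by
          rw [pvNeedB_eq, pvNeedB_eq]
          simp only [List.map_cons, List.sum_cons, List.length_cons]
          omega
        have lhs : pvLoopB d (pvNeedB d ((j :: rest) :: S) v + 1) ((j :: rest) :: S) v
            = pvLoopB d (pvNeedB d (rest :: S) v + 1) (rest :: S) v := by
          rw [hstep]; show (if j ∈ v then _ else _) = _; simp [hj]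
        rw [lhs, pvGoA_cons]
        simp only [hj, if_true]
        exact ihns v S hm (fun x hx => hsub x (List.mem_cons_of_mem _ hx)) hsok
      · -- discover step
        have hjV : j ∈ pvV d := hsub j List.mem_cons_self
        have hpos : 1 ≤ pvM d v := pvM_pos d hjV hj
        obtain ⟨f', rfl⟩ : ∃ f', f = f' + 1 := ⟨f - 1, by omega⟩
        have hrestV : ∀ x ∈ rest, x ∈ pvV d := fun x hx => hsub x (List.mem_cons_of_mem _ hx)
        have hsokRS : pvSOK d (rest :: S) := by
          intro ms h
          rcases List.mem_cons.1 h with h1 | h2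
          · subst h1; exact hrestV
          · exact hsok ms h2
        have hsokD : pvSOK d (pvGetAdj d j :: rest :: S) := by
          intro ms h
          rcases List.mem_cons.1 h with h1 | h2
          · subst h1; exact pvAdj_subset d j
          · exact hsokRS ms h2
        have lhs : pvLoopB d (pvNeedB d ((j :: rest) :: S) v + 1) ((j :: rest) :: S) v
            = pvLoopB d (pvNeedB d (pvGetAdj d j :: rest :: S) (v ++ [j]) + 1)
                (pvGetAdj d j :: rest :: S) (v ++ [j]) := by
          have h1 : pvLoopB d (pvNeedB d ((j :: rest) :: S) v + 1) ((j :: rest) :: S) v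
              = pvLoopB d (pvNeedB d ((j :: rest) :: S) v)
                  (pvGetAdj d j :: rest :: S) (v ++ [j]) := by
            show (if j ∈ v then _ else _) = _; simp [hj]
          rw [h1]
          exact pvB_stable d _ _ _ hsokD (pvNeedB_disc d rest S hjV hj)
        rw [lhs]
        have hm' : pvM d (v ++ [j]) ≤ f' := by
          have := pvM_strict d hjV hj; omega
        have hout := IHf f' (by omega) (pvGetAdj d j) (v ++ [j]) (rest :: S)
          hm' (pvAdj_subset d j) hsokRS
        rw [hout]
        set c2 := (pvGoA d f' (pvGetAdj d j) ([], v ++ [j])).2 with hc2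
        have hext : ∃ t, c2 = (v ++ [j]) ++ t := by
          obtain ⟨t, ht⟩ := (pvEP_GO d f').2 (pvGetAdj d j) ([], v ++ [j])
            (by show pvM d (v ++ [j]) ≤ f'; exact hm') (pvAdj_subset d j)
          exact ⟨t, by rw [hc2, ht]⟩
        have hmc2 : pvM d c2 ≤ f' + 1 := by
          obtain ⟨t, ht⟩ := hext
          calc pvM d c2 = pvM d (v ++ ([j] ++ t)) := by rw [ht]; simp
            _ ≤ pvM d v := pvM_antitone d v ([j] ++ t)
            _ ≤ f' + 1 := by omega
        have hin := ihns c2 S hmc2 hrestV hsok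
        rw [hin]
        have hgoal : (pvGoA d (f'+1) rest ([], c2)).2 = (pvGoA d (f'+1) (j :: rest) ([], v)).2 := by
          rw [pvGoA_cons]
          simp only [hj, if_false]
          have : (pvEachPathA d (f'+1) j v).2 = c2 := by
            rw [hc2]
            rfl
          rw [this]
          exact pvGoA_snd d (f'+1) rest [] ([] ++ j :: (pvEachPathA d (f'+1) j v).1) c2
        rw [hgoal]

-- ===== VERDICT (by name: the statement is the Claim_ definition above) =====
theorem get_chain_d_spec : Claim_equal_get_chain_d := by
  intro argDict _
  unfold Spec_get_chain_d get_chain_d get_chain_d_alt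
  apply List.map_congr_left
  intro p _
  refine congrArg (fun z => (p.1, z)) ?_
  have hsim := pvSIM argDict ((pvV argDict).length) (pvGetAdj argDict p.1) [p.1] []
    (pvM_le argDict [p.1]) (pvAdj_subset argDict p.1) (by intro ns h; simp at h)
  have hterm : pvLoopB argDict
      (pvNeedB argDict [] (pvGoA argDict (pvV argDict).length (pvGetAdj argDict p.1) ([], [p.1])).2 + 1)
      [] (pvGoA argDict (pvV argDict).length (pvGetAdj argDict p.1) ([], [p.1])).2
      = (pvGoA argDict (pvV argDict).length (pvGetAdj argDict p.1) ([], [p.1])).2 := rfl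
  rw [hterm] at hsim
  have hc2 : (pvGoA argDict (pvV argDict).length (pvGetAdj argDict p.1) ([], [p.1])).2
      = (pvEachPathA argDict ((pvV argDict).length + 1) p.1 []).2 := rfl
  have hEP := (pvEP_GO argDict ((pvV argDict).length + 1)).1 p.1 []
    (by have := pvM_le argDict ([] ++ [p.1]); omega)
  have hV : (argDict.map (·.2)).flatten.length = (pvV argDict).length := rfl
  rw [hV, hsim, hc2, hEP]
  simp
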